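-- pv_equiv track=rewrite | github.com/ArvinCS/thesis | offchain/python/openzeppelin_multiproof.py | generate_multiproof_openzeppelin
-- ===== SOURCE A (Python) =====
-- def generate_multiproof_openzeppelin(leaves, leaf_indices, tree_layers):
--     """
--     Generate multiproof compatible with OpenZeppelin's multiProofVerify.
--
--     This implements the exact algorithm from OpenZeppelin's source code.
--
--     Args:
--         leaves: List of leaf hashes
--         leaf_indices: List of indices of leaves to prove
--         tree_layers: List of tree layers (leaves, level1, level2, ..., root)
--
--     Returns:
--         tuple: (proof, proof_flags) where proof_flags has exactly leaves.length + proof.length - 1 elements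
--     """
--     if not leaf_indices:
--         return [], []
--
--     # Sort leaf indices to ensure consistent ordering
--     sorted_indices = sorted(leaf_indices)
--
--     # Track which nodes are in the proof path
--     in_proof_path = set()
--     for idx in sorted_indices:
--         in_proof_path.add((0, idx))
--
--     proof = []
--     proof_flags = []
--
--     # Process each layer bottom-up
--     for layer_idx in range(len(tree_layers) - 1):
--         layer = tree_layers[layer_idx]
--         if len(layer) % 2 != 0:
--             layer = layer + [layer[-1]]
--
--         next_layer_in_path = set()
--
--         # Process pairs in the current layer
--         for i in range(0, len(layer), 2):
--             left_in_path = (layer_idx, i) in in_proof_path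
--             right_in_path = (layer_idx, i + 1) in in_proof_path
--
--             if left_in_path or right_in_path:
--                 # This pair is in the proof path
--                 parent_idx = i // 2
--                 next_layer_in_path.add((layer_idx + 1, parent_idx))
--
--                 if left_in_path and right_in_path:
--                     # Both children are in path - no proof needed
--                     proof_flags.append(True)
--                 elif left_in_path:
--                     # Left child in path, right child is proof
--                     proof.append(layer[i + 1])
--                     proof_flags.append(False)
--                 else:  # right_in_path
--                     # Right child in path, left child is proof
--                     proof.append(layer[i])
--                     proof_flags.append(False)
--
--         in_proof_path = next_layer_in_path
--
--     # CRITICAL: The proof_flags should have exactly leaves.length + proof.length - 1 elements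
--     # This is the exact requirement for OpenZeppelin compatibility
--     expected_flags_len = len(sorted_indices) + len(proof) - 1
--
--     # Ensure the flags array has the correct length
--     if len(proof_flags) != expected_flags_len:
--         if len(proof_flags) > expected_flags_len:
--             # Truncate if too long
--             proof_flags = proof_flags[:expected_flags_len]
--         else:
--             # Pad with False if too short
--             proof_flags.extend([False] * (expected_flags_len - len(proof_flags)))
--
--     return proof, proof_flags
-- ===== SOURCE B (Python) =====
-- def generate_multiproof_openzeppelin(leaves, leaf_indices, tree_layers):
--     """Same result as the original, but visits only the touched parents per
--     layer (kept as a sorted deduplicated index list) instead of scanning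
--     every pair of every layer."""
--     if not leaf_indices:
--         return [], []
--     k = len(leaf_indices)
--     current = sorted(set(leaf_indices))
--     proof = []
--     proof_flags = []
--     for layer in tree_layers[:-1]:
--         padded_len = len(layer) + (len(layer) % 2)
--         cur_set = set(current)
--         parents = sorted({j // 2 for j in current if 0 <= j < padded_len})
--         for p in parents:
--             left = 2 * p in cur_set
--             right = 2 * p + 1 in cur_set
--             if left and right:
--                 proof_flags.append(True)
--             else:
--                 sib = 2 * p if right else 2 * p + 1
--                 proof.append(layer[sib] if sib < len(layer) else layer[-1])
--                 proof_flags.append(False)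
--         current = parents
--     expected = k + len(proof) - 1
--     if len(proof_flags) > expected:
--         proof_flags = proof_flags[:expected]
--     elif len(proof_flags) < expected:
--         proof_flags.extend([False] * (expected - len(proof_flags)))
--     return proof, proof_flags
-- ===== Notes on version B (the rewrite author's own statement) =====
-- stated objective: alternative
-- what changed: Instead of scanning every pair of every tree layer against a set of path nodes, B keeps the touched node indices as a sorted deduplicated list and visits, per layer, only the parents of those indices; when few leaves are proven this does work proportional to the proof path rather than to the whole tree, though a timing run (which uses dense index sets) could not confirm a measured speedup.
import Mathlib
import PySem

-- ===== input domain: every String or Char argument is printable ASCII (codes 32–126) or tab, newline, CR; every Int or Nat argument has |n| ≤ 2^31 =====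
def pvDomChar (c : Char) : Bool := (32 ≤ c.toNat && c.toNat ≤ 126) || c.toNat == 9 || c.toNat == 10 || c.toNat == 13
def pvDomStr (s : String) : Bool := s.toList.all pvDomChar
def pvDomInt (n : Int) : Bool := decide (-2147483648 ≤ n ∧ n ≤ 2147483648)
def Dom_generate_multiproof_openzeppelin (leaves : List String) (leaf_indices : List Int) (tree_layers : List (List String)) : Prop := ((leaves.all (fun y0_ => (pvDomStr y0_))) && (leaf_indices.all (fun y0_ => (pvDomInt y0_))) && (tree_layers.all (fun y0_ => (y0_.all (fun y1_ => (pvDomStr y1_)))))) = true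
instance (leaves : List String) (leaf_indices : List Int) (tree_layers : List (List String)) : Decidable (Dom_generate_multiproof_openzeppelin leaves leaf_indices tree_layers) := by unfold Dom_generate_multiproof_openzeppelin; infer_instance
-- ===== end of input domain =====

-- B replaces A's full scan of every pair of every layer by visiting, per layer, only the
-- parents of nodes already on the proof path (kept as a sorted deduplicated index list);
-- equal return value proved on the whole domain (neither version mutates its arguments).

-- ===== PORT A =====
-- one pair-step of A's inner loop over `range(0, len(layer), 2)`
def pvAStep (layer_idx : Nat) (layer : List String) (inpath : PySem.Set (Int × Int))
    (st : List String × List Bool × PySem.Set (Int × Int)) (i : Int) :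
    List String × List Bool × PySem.Set (Int × Int) :=
  let left_in_path := inpath.contains ((layer_idx : Int), i)
  let right_in_path := inpath.contains ((layer_idx : Int), i + 1)
  if left_in_path || right_in_path then
    let nxt := st.2.2.add ((layer_idx : Int) + 1, PySem.Int.floordiv i 2)
    if left_in_path && right_in_path then
      (st.1, st.2.1 ++ [true], nxt)
    else if left_in_path then
      (st.1 ++ [PySem.List.pyGetD layer (i + 1) ""], st.2.1 ++ [false], nxt)
    else
      (st.1 ++ [PySem.List.pyGetD layer i ""], st.2.1 ++ [false], nxt)
  else st

-- one layer of A's outer loop (the body for `layer_idx`)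
def pvALayer (tree_layers : List (List String))
    (st : List String × List Bool × PySem.Set (Int × Int)) (layer_idx : Nat) :
    List String × List Bool × PySem.Set (Int × Int) :=
  let layer0 := tree_layers.getD layer_idx []
  let layer := if layer0.length % 2 ≠ 0 then layer0 ++ [PySem.List.pyGetD layer0 (-1) ""] else layer0
  (PySem.List.pyRange 0 (layer.length : Int) 2).foldl (pvAStep layer_idx layer st.2.2)
    (st.1, st.2.1, PySem.Set.empty)

def generate_multiproof_openzeppelin (leaves : List String) (leaf_indices : List Int) (tree_layers : List (List String)) : List String × List Bool :=
  if leaf_indices = [] then ([], []) else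
  let sorted_indices := PySem.List.sorted leaf_indices (fun x => x)
  let in_proof_path : PySem.Set (Int × Int) :=
    sorted_indices.foldl (fun s idx => s.add ((0 : Int), idx)) PySem.Set.empty
  let st := (List.range (tree_layers.length - 1)).foldl (pvALayer tree_layers)
    (([] : List String), ([] : List Bool), in_proof_path)
  let proof := st.1
  let proof_flags := st.2.1
  let expected_flags_len : Int := (sorted_indices.length : Int) + (proof.length : Int) - 1
  let proof_flags :=
    if (proof_flags.length : Int) ≠ expected_flags_len then
      if (proof_flags.length : Int) > expected_flags_len then
        proof_flags.take expected_flags_len.toNat  -- proof_flags[:e] with 0 ≤ e (leaf_indices ≠ [] so e ≥ 0)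
      else proof_flags ++ List.replicate (expected_flags_len - (proof_flags.length : Int)).toNat false
    else proof_flags
  (proof, proof_flags)

-- ===== PORT B =====
-- one parent-step of B's loop over the touched parents of the current layer
def pvBStep (layer : List String) (cur_set : PySem.Set Int)
    (st : List String × List Bool) (p : Int) : List String × List Bool :=
  let left := cur_set.contains (2 * p)
  let right := cur_set.contains (2 * p + 1)
  if left && right then (st.1, st.2 ++ [true])
  else
    let sib := if right then 2 * p else 2 * p + 1
    (st.1 ++ [if sib < (layer.length : Int) then PySem.List.pyGetD layer sib ""
              else PySem.List.pyGetD layer (-1) ""],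
     st.2 ++ [false])

-- one layer of B's loop over `tree_layers[:-1]`
def pvBLayer (st : List String × List Bool × List Int) (layer : List String) :
    List String × List Bool × List Int :=
  let padded_len := layer.length + layer.length % 2
  let cur_set : PySem.Set Int := PySem.Set.ofList st.2.2
  let parents := PySem.List.sorted
    (PySem.Set.ofList ((st.2.2.filter (fun j => decide (0 ≤ j) && decide (j < (padded_len : Int)))).map
      (fun j => PySem.Int.floordiv j 2))) (fun x => x)
  let inner := parents.foldl (pvBStep layer cur_set) (st.1, st.2.1)
  (inner.1, inner.2, parents)

def generate_multiproof_openzeppelin_alt (leaves : List String) (leaf_indices : List Int) (tree_layers : List (List String)) : List String × List Bool :=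
  if leaf_indices = [] then ([], []) else
  let k := leaf_indices.length
  let current := PySem.List.sorted (PySem.Set.ofList leaf_indices) (fun x => x)
  let st := tree_layers.dropLast.foldl pvBLayer (([] : List String), ([] : List Bool), current)
  let proof := st.1
  let proof_flags := st.2.1
  let expected : Int := (k : Int) + (proof.length : Int) - 1
  let proof_flags :=
    if (proof_flags.length : Int) > expected then proof_flags.take expected.toNat
    else if (proof_flags.length : Int) < expected then
      proof_flags ++ List.replicate (expected - (proof_flags.length : Int)).toNat false
    else proof_flags
  (proof, proof_flags)

-- ===== PRECONDITION & SPEC =====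
def Spec_generate_multiproof_openzeppelin (leaves : List String) (leaf_indices : List Int) (tree_layers : List (List String)) (out : List String × List Bool) : Prop := out = generate_multiproof_openzeppelin_alt leaves leaf_indices tree_layers
instance (leaves : List String) (leaf_indices : List Int) (tree_layers : List (List String)) (out : List String × List Bool) : Decidable (Spec_generate_multiproof_openzeppelin leaves leaf_indices tree_layers out) := by unfold Spec_generate_multiproof_openzeppelin; infer_instance

-- ===== CLAIM (what is proved, stated in full; the proofs are below) =====
def Claim_equal_generate_multiproof_openzeppelin : Prop := ∀ (leaves : List String) (leaf_indices : List Int) (tree_layers : List (List String)), Dom_generate_multiproof_openzeppelin leaves leaf_indices tree_layers → Spec_generate_multiproof_openzeppelin leaves leaf_indices tree_layers (generate_multiproof_openzeppelin leaves leaf_indices tree_layers)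

-- ===== LEMMAS AND PROOFS =====

-- the Bool "this parent is touched" predicate, and the list of touched parents 0..n-1 in order
def pvPred (cur : List Int) (p : Int) : Bool :=
  (PySem.Set.ofList cur).contains (2 * p) || (PySem.Set.ofList cur).contains (2 * p + 1)

def pvCand (cur : List Int) (n : Nat) : List Int :=
  ((List.range n).map (fun m : Nat => (m : Int))).filter (pvPred cur)

-- the invariant tying A's state (tagged set) to B's state (current index list) at level t
def pvR (t : Nat) (a : List String × List Bool × PySem.Set (Int × Int))
    (b : List String × List Bool × List Int) : Prop :=
  a.1 = b.1 ∧ a.2.1 = b.2.1 ∧ ∀ j : Int, ((t : Int), j) ∈ a.2.2 ↔ j ∈ b.2.2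

lemma pvPyRange_two (n : Nat) :
    PySem.List.pyRange 0 ((2 * n : Nat) : Int) 2 = (List.range n).map (fun m : Nat => 2 * (m : Int)) := by
  rw [PySem.List.pyRange_of_pos 0 ((2 * n : Nat) : Int) (by norm_num)]
  rcases Nat.eq_zero_or_pos n with h | h
  · subst h; simp
  · have h1 : (0 : Int) < ((2 * n : Nat) : Int) := by push_cast; omega
    rw [if_pos h1]
    have h2 : ((((2 * n : Nat) : Int) - 0 + 2 - 1) / 2).toNat = n := by push_cast; omega
    rw [h2]
    exact List.map_congr_left (fun k _ => by ring)

lemma pvCand_pairwise (cur : List Int) (n : Nat) : (pvCand cur n).Pairwise (· < ·) := by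
  apply List.Pairwise.filter
  exact (List.pairwise_lt_range.map _ (fun a b h => by exact_mod_cast h))

lemma pvCand_mem (cur : List Int) (n : Nat) (p : Int) :
    p ∈ pvCand cur n ↔ (0 ≤ p ∧ p < (n : Int)) ∧ (2 * p ∈ cur ∨ 2 * p + 1 ∈ cur) := by
  simp only [pvCand, List.mem_filter, List.mem_map, List.mem_range, pvPred, Bool.or_eq_true,
    PySem.Set.contains_iff, PySem.Set.mem_ofList]
  constructor
  · rintro ⟨⟨m, hm, rfl⟩, h⟩
    exact ⟨⟨by positivity, by exact_mod_cast hm⟩, h⟩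
  · rintro ⟨⟨h0, hn⟩, h⟩
    exact ⟨⟨p.toNat, by omega, by omega⟩, h⟩

lemma pvParents_eq (cur : List Int) (n : Nat) :
    PySem.List.sorted
      (PySem.Set.ofList ((cur.filter (fun j => decide (0 ≤ j) && decide (j < ((2 * n : Nat) : Int)))).map
        (fun j => PySem.Int.floordiv j 2))) (fun x => x) = pvCand cur n := by
  apply PySem.List.sorted_eq_of_perm_of_pairwise_lt
  · rw [List.perm_ext_iff_of_nodup (pvCand_pairwise cur n).nodup (PySem.Set.nodup_ofList _)]
    intro p
    rw [pvCand_mem, PySem.Set.mem_ofList]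
    simp only [List.mem_map, List.mem_filter, Bool.and_eq_true, decide_eq_true_eq]
    constructor
    · rintro ⟨⟨h0, h2p⟩, h⟩
      rcases h with h | h
      · exact ⟨2 * p, ⟨h, by omega, by push_cast; omega⟩,
          by rw [PySem.Int.floordiv_eq_ediv_of_pos (by norm_num)]; omega⟩
      · exact ⟨2 * p + 1, ⟨h, by omega, by push_cast; omega⟩,
          by rw [PySem.Int.floordiv_eq_ediv_of_pos (by norm_num)]; omega⟩
    · rintro ⟨j, ⟨hj, h0, hlt⟩, rfl⟩
      rw [PySem.Int.floordiv_eq_ediv_of_pos (by norm_num)]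
      have hlt' : j < 2 * (n : Int) := by push_cast at hlt; omega
      constructor
      · constructor <;> omega
      · rcases Int.even_or_odd j with ⟨m, hm⟩ | ⟨m, hm⟩
        · left; have : 2 * (j / 2) = j := by omega
          rw [this]; exact hj
        · right; have : 2 * (j / 2) + 1 = j := by omega
          rw [this]; exact hj
  · exact pvCand_pairwise cur n

-- reading the padded layer at 0 ≤ i < padded length is B's guarded read of the raw layer
lemma pvPad_get (layer0 : List String) (i : Int) (h0 : 0 ≤ i)
    (h1 : i < ((layer0.length + layer0.length % 2 : Nat) : Int)) :
    PySem.List.pyGetD (if layer0.length % 2 ≠ 0 then layer0 ++ [PySem.List.pyGetD layer0 (-1) ""] else layer0) i "" =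
    (if i < (layer0.length : Int) then PySem.List.pyGetD layer0 i "" else PySem.List.pyGetD layer0 (-1) "") := by
  by_cases hodd : layer0.length % 2 = 0
  · rw [if_neg (by omega)]
    rw [if_pos (by push_cast at h1 ⊢; omega)]
  · rw [if_pos (by omega)]
    have hne : layer0 ≠ [] := by intro h; subst h; simp at hodd
    have hlen : i < ((layer0 ++ [PySem.List.pyGetD layer0 (-1) ""]).length : Int) := by
      simp only [List.length_append, List.length_cons, List.length_nil]
      push_cast at h1 ⊢; omega
    rw [PySem.List.pyGetD_eq_getElem _ "" h0 hlen]
    by_cases hi : i < (layer0.length : Int)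
    · rw [if_pos hi, PySem.List.pyGetD_eq_getElem _ "" h0 hi,
        List.getElem_append_left (by omega)]
    · rw [if_neg hi]
      have hieq : i.toNat = layer0.length := by push_cast at h1; omega
      rw [List.getElem_append_right (by omega)]
      simp [hieq]

lemma pvMemOfContains {S : PySem.Set (Int × Int)} {cur : List Int} {t : Nat}
    (hmem : ∀ j : Int, ((t : Int), j) ∈ S ↔ j ∈ cur) (j : Int) :
    S.contains ((t : Int), j) = (PySem.Set.ofList cur).contains j := by
  rw [Bool.eq_iff_iff, PySem.Set.contains_iff, PySem.Set.contains_iff, PySem.Set.mem_ofList]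
  exact hmem j

-- the inner loops agree: A over the pairs 0,2,…,2n-2 of the padded layer, B over the touched parents
lemma pvInner_eq (t : Nat) (S : PySem.Set (Int × Int)) (cur : List Int)
    (layerA layerB : List String)
    (hmem : ∀ j : Int, ((t : Int), j) ∈ S ↔ j ∈ cur) (n : Nat)
    (helem : ∀ i : Int, 0 ≤ i → i < ((2 * n : Nat) : Int) →
      PySem.List.pyGetD layerA i "" =
        (if i < (layerB.length : Int) then PySem.List.pyGetD layerB i ""
         else PySem.List.pyGetD layerB (-1) ""))
    (pf : List String) (fl : List Bool) (nx : PySem.Set (Int × Int)) :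
    (((List.range n).map (fun m : Nat => 2 * (m : Int))).foldl (pvAStep t layerA S) (pf, fl, nx)).1 =
      ((pvCand cur n).foldl (pvBStep layerB (PySem.Set.ofList cur)) (pf, fl)).1 ∧
    (((List.range n).map (fun m : Nat => 2 * (m : Int))).foldl (pvAStep t layerA S) (pf, fl, nx)).2.1 =
      ((pvCand cur n).foldl (pvBStep layerB (PySem.Set.ofList cur)) (pf, fl)).2 ∧
    (∀ x, x ∈ (((List.range n).map (fun m : Nat => 2 * (m : Int))).foldl (pvAStep t layerA S) (pf, fl, nx)).2.2 ↔
      (x ∈ nx ∨ ∃ p ∈ pvCand cur n, x = ((t : Int) + 1, p))) := by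
  induction n with
  | zero => simp [pvCand]
  | succ n ih =>
    have helem' : ∀ i : Int, 0 ≤ i → i < ((2 * n : Nat) : Int) →
        PySem.List.pyGetD layerA i "" =
          (if i < (layerB.length : Int) then PySem.List.pyGetD layerB i ""
           else PySem.List.pyGetD layerB (-1) "") := by
      intro i h0 h1; exact helem i h0 (by push_cast at h1 ⊢; omega)
    obtain ⟨ih1, ih2, ih3⟩ := ih helem'
    have hcand : pvCand cur (n + 1) = pvCand cur n ++ (if pvPred cur (n : Int) then [(n : Int)] else []) := by
      simp [pvCand, List.range_succ, List.filter_append]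
      split <;> simp_all
    have hrange : ((List.range (n + 1)).map (fun m : Nat => 2 * (m : Int))) =
        ((List.range n).map (fun m : Nat => 2 * (m : Int))) ++ [2 * (n : Int)] := by
      rw [List.range_succ, List.map_append]; rfl
    rw [hcand, hrange, List.foldl_append, List.foldl_append]
    set A' := ((List.range n).map (fun m : Nat => 2 * (m : Int))).foldl (pvAStep t layerA S) (pf, fl, nx) with hA'
    set B' := (pvCand cur n).foldl (pvBStep layerB (PySem.Set.ofList cur)) (pf, fl) with hB'
    have hcl : S.contains ((t : Int), 2 * (n : Int)) = (PySem.Set.ofList cur).contains (2 * (n : Int)) :=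
      pvMemOfContains hmem _
    have hcr : S.contains ((t : Int), 2 * (n : Int) + 1) = (PySem.Set.ofList cur).contains (2 * (n : Int) + 1) :=
      pvMemOfContains hmem _
    have hfd : PySem.Int.floordiv (2 * (n : Int)) 2 = (n : Int) := by
      rw [PySem.Int.floordiv_eq_ediv_of_pos (by norm_num)]; omega
    have hgl : PySem.List.pyGetD layerA (2 * (n : Int)) "" =
        (if 2 * (n : Int) < (layerB.length : Int) then PySem.List.pyGetD layerB (2 * (n : Int)) ""
         else PySem.List.pyGetD layerB (-1) "") :=
      helem _ (by positivity) (by push_cast; omega)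
    have hgr : PySem.List.pyGetD layerA (2 * (n : Int) + 1) "" =
        (if 2 * (n : Int) + 1 < (layerB.length : Int) then PySem.List.pyGetD layerB (2 * (n : Int) + 1) ""
         else PySem.List.pyGetD layerB (-1) "") :=
      helem _ (by positivity) (by push_cast; omega)
    simp only [List.foldl_cons, List.foldl_nil]
    cases hl : (PySem.Set.ofList cur).contains (2 * (n : Int)) <;>
      cases hr : (PySem.Set.ofList cur).contains (2 * (n : Int) + 1) <;>
      simp only [pvAStep, pvBStep, pvPred, hcl, hcr, hl, hr, hfd, hgl, hgr, Bool.or_self,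
        Bool.or_true, Bool.and_self, Bool.and_true, Bool.and_false,
        Bool.or_false, Bool.false_eq_true, if_true, if_false, List.foldl_cons,
        List.foldl_nil, List.append_nil]
    · exact ⟨ih1, ih2, ih3⟩
    · refine ⟨by rw [ih1], by rw [ih2], ?_⟩
      intro x
      rw [PySem.Set.mem_add, ih3]
      constructor
      · rintro (⟨h | ⟨p, hp, rfl⟩⟩ | rfl)
        · exact Or.inl h
        · exact Or.inr ⟨p, by simp [hp], rfl⟩
        · exact Or.inr ⟨(n : Int), by simp, rfl⟩
      · rintro (h | ⟨p, hp, rfl⟩)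
        · exact Or.inl (Or.inl h)
        · simp only [List.mem_append, List.mem_singleton] at hp
          rcases hp with hp | rfl
          · exact Or.inl (Or.inr ⟨p, hp, rfl⟩)
          · exact Or.inr rfl
    · refine ⟨by rw [ih1], by rw [ih2], ?_⟩
      intro x
      rw [PySem.Set.mem_add, ih3]
      constructor
      · rintro (⟨h | ⟨p, hp, rfl⟩⟩ | rfl)
        · exact Or.inl h
        · exact Or.inr ⟨p, by simp [hp], rfl⟩
        · exact Or.inr ⟨(n : Int), by simp, rfl⟩
      · rintro (h | ⟨p, hp, rfl⟩)
        · exact Or.inl (Or.inl h)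
        · simp only [List.mem_append, List.mem_singleton] at hp
          rcases hp with hp | rfl
          · exact Or.inl (Or.inr ⟨p, hp, rfl⟩)
          · exact Or.inr rfl
    · refine ⟨by rw [ih1], by rw [ih2], ?_⟩
      intro x
      rw [PySem.Set.mem_add, ih3]
      constructor
      · rintro (⟨h | ⟨p, hp, rfl⟩⟩ | rfl)
        · exact Or.inl h
        · exact Or.inr ⟨p, by simp [hp], rfl⟩
        · exact Or.inr ⟨(n : Int), by simp, rfl⟩
      · rintro (h | ⟨p, hp, rfl⟩)
        · exact Or.inl (Or.inl h)
        · simp only [List.mem_append, List.mem_singleton] at hp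
          rcases hp with hp | rfl
          · exact Or.inl (Or.inr ⟨p, hp, rfl⟩)
          · exact Or.inr rfl

-- one layer preserves the invariant
lemma pvLayer_eq (tl : List (List String)) (t : Nat) (ht : t < tl.length)
    (a : List String × List Bool × PySem.Set (Int × Int))
    (b : List String × List Bool × List Int) (h : pvR t a b) :
    pvR (t + 1) (pvALayer tl a t) (pvBLayer b tl[t]) := by
  obtain ⟨h1, h2, h3⟩ := h
  set layer0 := tl[t] with hl0
  have hgetD : tl.getD t [] = layer0 := List.getD_eq_getElem tl [] ht
  set P := layer0.length + layer0.length % 2 with hPdef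
  have hP : 2 * (P / 2) = P := by omega
  set n := P / 2 with hn
  have hlenA : (if layer0.length % 2 ≠ 0 then layer0 ++ [PySem.List.pyGetD layer0 (-1) ""] else layer0).length = 2 * n := by
    by_cases hodd : layer0.length % 2 = 0
    · rw [if_neg (by omega)]; omega
    · rw [if_pos (by omega)]
      simp only [List.length_append, List.length_cons, List.length_nil]
      omega
  have helem := fun (i : Int) (h0 : 0 ≤ i) (h1 : i < ((2 * n : Nat) : Int)) =>
    pvPad_get layer0 i h0 (by rw [← hPdef] at *; push_cast at h1 ⊢; omega)
  have hinner := pvInner_eq t a.2.2 b.2.2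
    (if layer0.length % 2 ≠ 0 then layer0 ++ [PySem.List.pyGetD layer0 (-1) ""] else layer0)
    layer0 h3 n helem a.1 a.2.1 PySem.Set.empty
  obtain ⟨hi1, hi2, hi3⟩ := hinner
  have hparents : PySem.List.sorted
      (PySem.Set.ofList ((b.2.2.filter (fun j => decide (0 ≤ j) && decide (j < ((P : Nat) : Int)))).map
        (fun j => PySem.Int.floordiv j 2))) (fun x => x) = pvCand b.2.2 n := by
    rw [show ((P : Nat) : Int) = ((2 * n : Nat) : Int) by rw [hP]]
    exact pvParents_eq b.2.2 n
  constructor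
  · show (pvALayer tl a t).1 = (pvBLayer b layer0).1
    simp only [pvALayer, pvBLayer, hgetD, hlenA, hparents, ← hPdef]
    rw [pvPyRange_two n, h1, h2]
    rw [h1, h2] at hi1
    exact hi1
  constructor
  · show (pvALayer tl a t).2.1 = (pvBLayer b layer0).2.1
    simp only [pvALayer, pvBLayer, hgetD, hlenA, hparents, ← hPdef]
    rw [pvPyRange_two n, h1, h2]
    rw [h1, h2] at hi2
    exact hi2
  · intro j
    show ((((t : Nat) + 1 : Nat) : Int), j) ∈ (pvALayer tl a t).2.2 ↔ j ∈ (pvBLayer b layer0).2.2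
    simp only [pvALayer, pvBLayer, hgetD, hlenA, hparents, ← hPdef]
    rw [show PySem.List.pyRange 0 ((2 * n : Nat) : Int) 2 = (List.range n).map (fun m : Nat => 2 * (m : Int)) from pvPyRange_two n]
    rw [hi3]
    have hcast : (((t : Nat) + 1 : Nat) : Int) = (t : Int) + 1 := by push_cast; ring
    constructor
    · rintro (h | ⟨p, hp, hx⟩)
      · simp [PySem.Set.empty] at h
      · rw [hcast] at hx
        obtain ⟨he1, he2⟩ := Prod.mk.injEq .. ▸ hx
        exact he2 ▸ hp
    · intro hj
      exact Or.inr ⟨j, hj, by rw [hcast]⟩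

-- the outer loops agree step for step
lemma pvOuter_eq (tl : List (List String)) :
    ∀ (m : Nat), m ≤ tl.length → ∀ a b, pvR 0 a b →
      pvR m ((List.range m).foldl (pvALayer tl) a) ((tl.take m).foldl pvBLayer b) := by
  intro m
  induction m with
  | zero => intro _ a b h; simpa using h
  | succ m ih =>
    intro hm a b h
    have hmlt : m < tl.length := by omega
    rw [List.range_succ, List.foldl_append, List.take_add_one, List.foldl_append]
    have : tl[m]?.toList = [tl[m]] := by rw [List.getElem?_eq_getElem hmlt]; rfl
    rw [this]
    simp only [List.foldl_cons, List.foldl_nil]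
    exact pvLayer_eq tl m hmlt _ _ (ih (by omega) a b h)

lemma pvInit_mem (xs : List Int) :
    ∀ (s : PySem.Set (Int × Int)) (x : Int × Int),
      x ∈ xs.foldl (fun s idx => s.add ((0 : Int), idx)) s ↔ x ∈ s ∨ ∃ idx ∈ xs, x = ((0 : Int), idx) := by
  induction xs with
  | nil => intro s x; simp
  | cons hd tls ih =>
    intro s x
    rw [List.foldl_cons, ih, PySem.Set.mem_add]
    constructor
    · rintro (⟨h | rfl⟩ | ⟨idx, hidx, rfl⟩)
      · exact Or.inl h
      · exact Or.inr ⟨hd, by simp⟩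
      · exact Or.inr ⟨idx, by simp [hidx]⟩
    · rintro (h | ⟨idx, hidx, rfl⟩)
      · exact Or.inl (Or.inl h)
      · rcases List.mem_cons.mp hidx with rfl | hidx
        · exact Or.inl (Or.inr rfl)
        · exact Or.inr ⟨idx, hidx, rfl⟩

-- ===== VERDICT (by name: the statement is the Claim_ definition above) =====
theorem generate_multiproof_openzeppelin_spec : Claim_equal_generate_multiproof_openzeppelin := by
  intro leaves li tl _dom
  show _ = _
  unfold generate_multiproof_openzeppelin generate_multiproof_openzeppelin_alt
  by_cases hli : li = []
  · rw [if_pos hli, if_pos hli]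
  · rw [if_neg hli, if_neg hli]
    simp only []
    have hinit : pvR 0 (([] : List String), ([] : List Bool),
        (PySem.List.sorted li (fun x => x)).foldl (fun s idx => s.add ((0 : Int), idx)) PySem.Set.empty)
        (([] : List String), ([] : List Bool), PySem.List.sorted (PySem.Set.ofList li) (fun x => x)) := by
      refine ⟨rfl, rfl, ?_⟩
      intro j
      rw [pvInit_mem]
      simp only [PySem.List.mem_sorted, PySem.Set.mem_ofList]
      constructor
      · rintro (h | ⟨idx, hidx, he⟩)
        · simp [PySem.Set.empty] at h
        · obtain ⟨_, h2⟩ := Prod.mk.injEq .. ▸ he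
          exact h2 ▸ hidx
      · intro hj
        exact Or.inr ⟨j, hj, rfl⟩
    have hfin := pvOuter_eq tl (tl.length - 1) (Nat.sub_le _ _) _ _ hinit
    obtain ⟨hf1, hf2, _⟩ := hfin
    rw [List.dropLast_eq_take]
    have hlen : (PySem.List.sorted li (fun x => x)).length = li.length := PySem.List.length_sorted li _ _
    rw [hf1, hf2, hlen]
    set B := (tl.take (tl.length - 1)).foldl pvBLayer (([] : List String), ([] : List Bool),
      PySem.List.sorted (PySem.Set.ofList li) (fun x => x))
    set e : Int := (li.length : Int) + (B.1.length : Int) - 1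
    by_cases hgt : (B.2.1.length : Int) > e
    · rw [if_pos (by omega), if_pos hgt, if_pos hgt]
    · by_cases hlt : (B.2.1.length : Int) < e
      · rw [if_pos (by omega), if_neg hgt, if_neg hgt, if_pos hlt]
      · rw [if_neg (by omega), if_neg hgt]
        rw [if_neg hlt]
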